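-- pv_equiv track=rewrite | github.com/GeneralVimes/AS32JS | converter.py | find_next_word
-- ===== SOURCE A (Python) =====
-- def find_next_word(ln, start_id):
-- 	res=""
-- 	is_in_word=False
-- 	for chid in range(start_id, len(ln)):
-- 		ch = ln[chid]
-- 		if ch.isalnum() or ch=="_":
-- 			is_in_word=True
-- 			res+=ch
-- 		else:
-- 			if is_in_word:
-- 				break;
-- 	return res
-- ===== SOURCE B (Python) =====
-- def find_next_word(ln, start_id):
--     n = len(ln)
--     start = None
--     for i in range(start_id, n):
--         if ln[i].isalnum() or ln[i] == "_":
--             start = i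
--             break
--     if start is None:
--         return ""
--     end = start
--     while end < n and (ln[end].isalnum() or ln[end] == "_"):
--         end += 1
--     return "".join(ln[i] for i in range(start, end))
-- ===== Notes on version B (the rewrite author's own statement) =====
-- stated objective: alternative
-- what changed: Replaces A's single accumulate-while-flagged loop (res string built char by char with an is_in_word flag) by a find-start scan, then a while-loop extending an end index, then a join over the index range; no accumulator or flag.
import Mathlib
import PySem

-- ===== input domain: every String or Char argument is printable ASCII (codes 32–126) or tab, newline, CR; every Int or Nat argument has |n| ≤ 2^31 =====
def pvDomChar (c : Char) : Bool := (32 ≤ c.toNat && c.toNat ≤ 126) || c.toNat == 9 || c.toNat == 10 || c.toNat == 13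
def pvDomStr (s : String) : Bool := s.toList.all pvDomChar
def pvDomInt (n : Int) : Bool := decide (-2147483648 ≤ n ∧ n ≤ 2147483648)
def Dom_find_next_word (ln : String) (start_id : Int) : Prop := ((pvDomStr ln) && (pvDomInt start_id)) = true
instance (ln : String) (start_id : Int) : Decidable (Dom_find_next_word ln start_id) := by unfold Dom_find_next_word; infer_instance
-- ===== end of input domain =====

-- B rewrites A's flag-and-accumulator loop as find start index / extend end index / join the
-- index range; same O(n) cost, different decomposition. Equivalence proved on Pre_ (A returns there).

-- ===== PORT A =====
-- a word character: ch.isalnum() or ch == "_"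
def pvWordChar (c : Char) : Bool := PySem.Chars.isalnum c || c == '_'

-- A's loop: for chid in idxs, state (res, is_in_word); pyGet? none = IndexError (excluded by Pre_)
def fnwA_loop (cs : List Char) (idxs : List Int) (res : List Char) (inw : Bool) : List Char :=
  match idxs with
  | [] => res
  | i :: rest =>
    match PySem.List.pyGet? cs i with
    | none => res   -- IndexError in Python; inputs reaching this are outside Pre_
    | some ch =>
      if pvWordChar ch then fnwA_loop cs rest (res ++ [ch]) true
      else if inw then res else fnwA_loop cs rest res inw

def find_next_word (ln : String) (start_id : Int) : String :=
  String.mk (fnwA_loop ln.toList (PySem.List.pyRange start_id (ln.toList.length : Int) 1) [] false)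

-- ===== PORT B =====
-- first index i in idxs with a word character (B's first for-loop; break ⇒ return that i)
def fnwB_start (cs : List Char) (idxs : List Int) : Option Int :=
  match idxs with
  | [] => none
  | i :: rest =>
    match PySem.List.pyGet? cs i with
    | none => none   -- IndexError in Python; inputs reaching this are outside Pre_
    | some ch => if pvWordChar ch then some i else fnwB_start cs rest

-- B's while loop: advance e while e < n and ln[e] is a word character
def fnwB_end (cs : List Char) (n e : Int) : Int :=
  if h : e < n then
    match PySem.List.pyGet? cs e with
    | none => e   -- IndexError in Python; inputs reaching this are outside Pre_
    | some ch => if pvWordChar ch then fnwB_end cs n (e + 1) else e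
  else e
termination_by (n - e).toNat
decreasing_by omega

-- B's join over the generator ln[i] for i in range(start, end)
def fnwB_join (cs : List Char) (idxs : List Int) : List Char :=
  idxs.foldr (fun i acc =>
    match PySem.List.pyGet? cs i with
    | none => acc   -- IndexError in Python; inputs reaching this are outside Pre_
    | some ch => ch :: acc) []

def find_next_word_alt (ln : String) (start_id : Int) : String :=
  let cs := ln.toList
  let n : Int := (cs.length : Int)
  match fnwB_start cs (PySem.List.pyRange start_id n 1) with
  | none => ""
  | some s => String.mk (fnwB_join cs (PySem.List.pyRange s (fnwB_end cs n s) 1))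

-- ===== PRECONDITION & SPEC =====
-- A raises IndexError iff start_id < -len(ln) (then some ln[chid] is out of range); Pre_ excludes exactly that.
def Pre_find_next_word (ln : String) (start_id : Int) : Prop :=
  -(ln.toList.length : Int) ≤ start_id
instance (ln : String) (start_id : Int) : Decidable (Pre_find_next_word ln start_id) := by
  unfold Pre_find_next_word; infer_instance

def pvWitness_find_next_word : String × Int := ("see a word", 2)

def Spec_find_next_word (ln : String) (start_id : Int) (out : String) : Prop := out = find_next_word_alt ln start_id
instance (ln : String) (start_id : Int) (out : String) : Decidable (Spec_find_next_word ln start_id out) := by unfold Spec_find_next_word; infer_instance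

-- ===== CLAIM (what is proved, stated in full; the proofs are below) =====
def Claim_equal_find_next_word : Prop := ∀ (ln : String) (start_id : Int), Dom_find_next_word ln start_id → Pre_find_next_word ln start_id → Spec_find_next_word ln start_id (find_next_word ln start_id)

-- ===== LEMMAS AND PROOFS =====

-- the end index never moves backwards
theorem fnwB_end_le (cs : List Char) (n e : Int) : e ≤ fnwB_end cs n e := by
  unfold fnwB_end
  split
  · rename_i h
    match hg : PySem.List.pyGet? cs e with
    | none => simp [hg]
    | some ch =>
      simp only [hg]
      split
      · have := fnwB_end_le cs n (e + 1); omega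
      · exact le_refl e
  · exact le_refl e
termination_by (n - e).toNat
decreasing_by omega

-- collect phase: A's loop with is_in_word = true equals res ++ the chars from i up to B's end index
theorem fnwA_collect (cs : List Char) (n : Int) (hn : n = (cs.length : Int)) :
    ∀ (i : Int) (res : List Char),
      fnwA_loop cs (PySem.List.pyRange i n 1) res true
        = res ++ fnwB_join cs (PySem.List.pyRange i (fnwB_end cs n i) 1) := by
  intro i res
  by_cases h : i < n
  · rw [PySem.List.pyRange_one_cons h]
    unfold fnwA_loop
    match hg : PySem.List.pyGet? cs i with
    | none =>
      rw [fnwB_end]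
      simp [h, hg, fnwB_join, PySem.List.pyRange_one_eq_nil (le_refl i)]
    | some ch =>
      simp only [hg]
      by_cases hw : pvWordChar ch = true
      · simp only [hw, if_true]
        rw [fnwA_collect cs n hn (i + 1) (res ++ [ch])]
        have hend : fnwB_end cs n i = fnwB_end cs n (i + 1) := by
          rw [fnwB_end]; simp [h, hg, hw]
        have hlt : i < fnwB_end cs n i := by
          have := fnwB_end_le cs n (i + 1); omega
        rw [hend] at hlt ⊢
        rw [PySem.List.pyRange_one_cons hlt]
        simp [fnwB_join, hg]
      · simp only [hw, if_false, if_true, Bool.false_eq_true]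
        have hend : fnwB_end cs n i = i := by
          rw [fnwB_end]; simp [h, hg, hw]
        rw [hend, PySem.List.pyRange_one_eq_nil (le_refl i)]
        simp [fnwB_join]
  · rw [PySem.List.pyRange_one_eq_nil (by omega)]
    have hend : fnwB_end cs n i = i := by rw [fnwB_end]; simp [h]
    rw [hend, PySem.List.pyRange_one_eq_nil (le_refl i)]
    simp [fnwA_loop, fnwB_join]
termination_by i _ => (n - i).toNat
decreasing_by omega

-- skip phase: A's loop with is_in_word = false equals B's start-then-end-then-join composition
theorem fnwA_skip (cs : List Char) (n : Int) (hn : n = (cs.length : Int)) :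
    ∀ (i : Int),
      fnwA_loop cs (PySem.List.pyRange i n 1) [] false
        = match fnwB_start cs (PySem.List.pyRange i n 1) with
          | none => []
          | some s => fnwB_join cs (PySem.List.pyRange s (fnwB_end cs n s) 1) := by
  intro i
  by_cases h : i < n
  · rw [PySem.List.pyRange_one_cons h]
    unfold fnwA_loop fnwB_start
    match hg : PySem.List.pyGet? cs i with
    | none => simp [hg]
    | some ch =>
      simp only [hg]
      by_cases hw : pvWordChar ch = true
      · simp only [hw, if_true, List.nil_append]
        rw [fnwA_collect cs n hn (i + 1) [ch]]
        have hend : fnwB_end cs n i = fnwB_end cs n (i + 1) := by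
          rw [fnwB_end]; simp [h, hg, hw]
        have hlt : i < fnwB_end cs n i := by
          have := fnwB_end_le cs n (i + 1); omega
        rw [hend] at hlt
        rw [hend, PySem.List.pyRange_one_cons hlt]
        simp [fnwB_join, hg]
      · simp only [hw, if_false, Bool.false_eq_true]
        exact fnwA_skip cs n hn (i + 1)
  · rw [PySem.List.pyRange_one_eq_nil (by omega)]
    simp [fnwA_loop, fnwB_start]
termination_by i => (n - i).toNat
decreasing_by omega

-- ===== VERDICT (by name: the statement is the Claim_ definition above) =====
theorem find_next_word_spec : Claim_equal_find_next_word := by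
  intro ln start_id _ _
  unfold Spec_find_next_word find_next_word find_next_word_alt
  rw [fnwA_skip ln.toList (ln.toList.length : Int) rfl start_id]
  cases hs : fnwB_start ln.toList (PySem.List.pyRange start_id (ln.toList.length : Int) 1) with
  | none => simp_all; decide
  | some s => simp_all
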